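-- pv_equiv track=rewrite | github.com/george-poole/LUCiFEx | lucifex/utils/fenicsx_utils/expr_utils.py | is_family_alias
-- ===== SOURCE A (Python) =====
-- from enum import Enum
--
-- class ElementFamilyType(set, Enum):
--     CONTINUOUS_LAGRANGE = {"P", "Q", "CG", "Lagrange"}
--     DISCONTINOUS_LAGRANGE = {"DP", "DQ", "DG", "Discontinuous Lagrange"}
--     LAGRANGE = DISCONTINOUS_LAGRANGE | CONTINUOUS_LAGRANGE
--     BREZZI_DOUGLAS_MARINI = {"BDM", "Brezzi-Douglas-Marini"}
--     RAVIART_THOMAS = {"RT", "Raviart-Thomas"}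
--
-- def is_family_alias(
--     name: str,
--     other: str,
-- ) -> bool:
--     if name == other:
--         return True
--     else:
--         for family in ElementFamilyType:
--             if (name in family) and (other in family):
--                 return True
--             # if (name in family) and (other not in family):
--             #     return False
--         return False
-- ===== SOURCE B (Python) =====
-- # Per-name family bitmask table: alias check becomes one bitwise AND (no scan over families).
-- # Bit 0: CONTINUOUS_LAGRANGE, bit 1: DISCONTINOUS_LAGRANGE, bit 2: LAGRANGE,
-- # bit 3: BREZZI_DOUGLAS_MARINI, bit 4: RAVIART_THOMAS.
-- _ALIAS_MASK = {
--     "P": 5, "Q": 5, "CG": 5, "Lagrange": 5,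
--     "DP": 6, "DQ": 6, "DG": 6, "Discontinuous Lagrange": 6,
--     "BDM": 8, "Brezzi-Douglas-Marini": 8,
--     "RT": 16, "Raviart-Thomas": 16,
-- }
--
--
-- def is_family_alias(
--     name: str,
--     other: str,
-- ) -> bool:
--     return name == other or (_ALIAS_MASK.get(name, 0) & _ALIAS_MASK.get(other, 0)) != 0
-- ===== Notes on version B (the rewrite author's own statement) =====
-- stated objective: alternative
-- what changed: Replaces A's per-call loop over Enum families (testing both names for membership in each set) with a flat per-name family-bitmask table; the alias test is two dict lookups and one bitwise AND, no loop at all.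
import Mathlib
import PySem

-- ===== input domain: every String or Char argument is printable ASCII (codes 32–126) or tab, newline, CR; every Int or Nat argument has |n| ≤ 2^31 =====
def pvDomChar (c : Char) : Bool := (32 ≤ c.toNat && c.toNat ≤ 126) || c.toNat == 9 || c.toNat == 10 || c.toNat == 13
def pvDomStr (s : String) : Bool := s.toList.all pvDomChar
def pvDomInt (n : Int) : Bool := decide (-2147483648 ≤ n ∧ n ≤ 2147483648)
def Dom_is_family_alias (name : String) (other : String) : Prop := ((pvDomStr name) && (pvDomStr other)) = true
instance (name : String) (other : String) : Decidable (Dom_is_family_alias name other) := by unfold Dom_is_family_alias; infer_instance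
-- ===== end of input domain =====

-- B replaces A's per-call loop over the Enum families by a flat per-name family-bitmask
-- table: the alias test is two lookups and one bitwise AND; objective: alternative.

-- ===== PORT A =====
-- the five ElementFamilyType members, in Enum definition order; Python's sets are used
-- for membership only, so lists of their distinct elements are exact here
def famList : List (List String) :=
  [["P", "Q", "CG", "Lagrange"],
   ["DP", "DQ", "DG", "Discontinuous Lagrange"],
   ["DP", "DQ", "DG", "Discontinuous Lagrange", "P", "Q", "CG", "Lagrange"],
   ["BDM", "Brezzi-Douglas-Marini"],
   ["RT", "Raviart-Thomas"]]

-- the 'for family in ElementFamilyType' loop with early return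
def aLoop (name other : String) : List (List String) → Bool
  | [] => false
  | f :: rest => if f.contains name && f.contains other then true else aLoop name other rest

def is_family_alias (name : String) (other : String) : Bool :=
  if name == other then true
  else aLoop name other famList

-- ===== PORT B =====
-- _ALIAS_MASK: bit 0 CONTINUOUS_LAGRANGE, bit 1 DISCONTINOUS_LAGRANGE, bit 2 LAGRANGE,
-- bit 3 BREZZI_DOUGLAS_MARINI, bit 4 RAVIART_THOMAS
def aliasMask : PySem.Dict String Nat := PySem.Dict.mk
  [("P", 5), ("Q", 5), ("CG", 5), ("Lagrange", 5),
   ("DP", 6), ("DQ", 6), ("DG", 6), ("Discontinuous Lagrange", 6),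
   ("BDM", 8), ("Brezzi-Douglas-Marini", 8),
   ("RT", 16), ("Raviart-Thomas", 16)]

def is_family_alias_alt (name : String) (other : String) : Bool :=
  name == other || (aliasMask.getD name 0 &&& aliasMask.getD other 0) != 0

-- ===== PRECONDITION & SPEC =====
def Spec_is_family_alias (name : String) (other : String) (out : Bool) : Prop := out = is_family_alias_alt name other
instance (name : String) (other : String) (out : Bool) : Decidable (Spec_is_family_alias name other out) := by unfold Spec_is_family_alias; infer_instance

-- ===== CLAIM (what is proved, stated in full; the proofs are below) =====
def Claim_equal_is_family_alias : Prop := ∀ (name : String) (other : String), Dom_is_family_alias name other → Spec_is_family_alias name other (is_family_alias name other)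

-- ===== LEMMAS AND PROOFS =====

-- all names occurring in any family / in the mask table
def pvAllNames : List String :=
  ["P", "Q", "CG", "Lagrange", "DP", "DQ", "DG", "Discontinuous Lagrange",
   "BDM", "Brezzi-Douglas-Marini", "RT", "Raviart-Thomas"]

theorem mask_out (s : String) (h : s ∉ pvAllNames) :
    aliasMask.getD s 0 = 0 := by
  simp [pvAllNames] at h
  obtain ⟨h1, h2, h3, h4, h5, h6, h7, h8, h9, h10, h11, h12⟩ := h
  have g1 : (("P" : String) == s) = false := beq_eq_false_iff_ne.mpr (fun e => h1 e.symm)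
  have g2 : (("Q" : String) == s) = false := beq_eq_false_iff_ne.mpr (fun e => h2 e.symm)
  have g3 : (("CG" : String) == s) = false := beq_eq_false_iff_ne.mpr (fun e => h3 e.symm)
  have g4 : (("Lagrange" : String) == s) = false := beq_eq_false_iff_ne.mpr (fun e => h4 e.symm)
  have g5 : (("DP" : String) == s) = false := beq_eq_false_iff_ne.mpr (fun e => h5 e.symm)
  have g6 : (("DQ" : String) == s) = false := beq_eq_false_iff_ne.mpr (fun e => h6 e.symm)
  have g7 : (("DG" : String) == s) = false := beq_eq_false_iff_ne.mpr (fun e => h7 e.symm)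
  have g8 : (("Discontinuous Lagrange" : String) == s) = false := beq_eq_false_iff_ne.mpr (fun e => h8 e.symm)
  have g9 : (("BDM" : String) == s) = false := beq_eq_false_iff_ne.mpr (fun e => h9 e.symm)
  have g10 : (("Brezzi-Douglas-Marini" : String) == s) = false := beq_eq_false_iff_ne.mpr (fun e => h10 e.symm)
  have g11 : (("RT" : String) == s) = false := beq_eq_false_iff_ne.mpr (fun e => h11 e.symm)
  have g12 : (("Raviart-Thomas" : String) == s) = false := beq_eq_false_iff_ne.mpr (fun e => h12 e.symm)
  simp [aliasMask, PySem.Dict.getD, PySem.Dict.get?, List.find?,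
        g1, g2, g3, g4, g5, g6, g7, g8, g9, g10, g11, g12]

theorem alt_out (name other : String) (h : name ∉ pvAllNames ∨ other ∉ pvAllNames) :
    is_family_alias_alt name other = (name == other) := by
  unfold is_family_alias_alt
  rcases h with h | h <;> rw [mask_out _ h] <;> simp

theorem fam_sub : ∀ f ∈ famList, ∀ s ∈ f, s ∈ pvAllNames := by
  intro f hf s hs
  simp only [famList, List.mem_cons, List.not_mem_nil, or_false] at hf
  rcases hf with rfl | rfl | rfl | rfl | rfl <;>
    · simp only [List.mem_cons, List.not_mem_nil, or_false] at hs
      simp only [pvAllNames, List.mem_cons, List.not_mem_nil, or_false]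
      tauto

theorem a_out (name other : String) (h : name ∉ pvAllNames ∨ other ∉ pvAllNames) :
    is_family_alias name other = (name == other) := by
  unfold is_family_alias
  by_cases he : name = other
  · simp [he]
  · have hne : (name == other) = false := by simp [he]
    rw [hne]
    simp only [Bool.false_eq_true, if_false]
    have hcont : ∀ f ∈ famList, (f.contains name && f.contains other) = false := by
      intro f hf
      rcases h with h | h
      · have hc : f.contains name = false := by
          simpa using fun hm => h (fam_sub f hf name hm)
        simp only [hc, Bool.false_and]
      · have hc : f.contains other = false := by
          simpa using fun hm => h (fam_sub f hf other hm)
        simp only [hc, Bool.and_false]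
    have main : ∀ fs : List (List String),
        (∀ f ∈ fs, (f.contains name && f.contains other) = false) →
        aLoop name other fs = false := by
      intro fs
      induction fs with
      | nil => intro _; rfl
      | cons f rest ih =>
        intro hall
        simp only [aLoop, hall f (List.mem_cons_self ..), Bool.false_eq_true, if_false]
        exact ih (fun g hg => hall g (List.mem_cons_of_mem _ hg))
    exact main famList hcont

-- ===== VERDICT (by name: the statement is the Claim_ definition above) =====
theorem is_family_alias_spec : Claim_equal_is_family_alias := by
  intro name other _
  unfold Spec_is_family_alias
  by_cases hn : name ∈ pvAllNames
  · by_cases ho : other ∈ pvAllNames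
    · simp only [pvAllNames, List.mem_cons, List.not_mem_nil, or_false] at hn ho
      rcases hn with hn | hn | hn | hn | hn | hn | hn | hn | hn | hn | hn | hn <;> subst hn <;>
        rcases ho with ho | ho | ho | ho | ho | ho | ho | ho | ho | ho | ho | ho <;> subst ho <;>
          decide
    · rw [a_out name other (Or.inr ho), alt_out name other (Or.inr ho)]
  · rw [a_out name other (Or.inl hn), alt_out name other (Or.inl hn)]
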